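-- pv_equiv track=rewrite | github.com/jimmyahalpara/2048-game | 2048.py | check
-- ===== SOURCE A (Python) =====
-- def check(lis):
--     l=lis[:]
--     con=False
--     for i in range(len(l)):
--         if l[i]==' ':
--             continue
--         else:
--             for j in range(i+1,len(l)):
--                 if (l[i]==l[j]):
--                     con=True
--                 elif l[j]==' ':
--                     continue
--                 else:
--                     break
--     return con
-- ===== SOURCE B (Python) =====
-- def check(lis):
--     prev = None
--     for x in lis:
--         if x == ' ':
--             continue
--         if x == prev:
--             return True
--         prev = x
--     return False
-- ===== Notes on version B (the rewrite author's own statement) =====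
-- stated objective: faster
-- what changed: Replaced the nested forward scan (for each non-space cell, rescan the rest of the list) by a single pass that tracks the previous non-space value and returns True as soon as it repeats.
import Mathlib
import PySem

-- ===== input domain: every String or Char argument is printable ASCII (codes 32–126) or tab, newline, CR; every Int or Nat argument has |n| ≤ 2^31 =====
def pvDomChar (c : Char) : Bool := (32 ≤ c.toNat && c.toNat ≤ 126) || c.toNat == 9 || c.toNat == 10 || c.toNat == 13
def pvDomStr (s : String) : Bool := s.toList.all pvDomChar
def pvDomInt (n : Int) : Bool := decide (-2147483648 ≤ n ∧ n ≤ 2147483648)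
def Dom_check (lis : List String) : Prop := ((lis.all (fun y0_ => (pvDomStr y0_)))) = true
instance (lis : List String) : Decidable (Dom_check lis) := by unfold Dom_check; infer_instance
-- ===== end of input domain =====

-- B replaces A's nested rescan by one pass tracking the previous non-space value (same result, O(n)).

-- ===== PORT A =====
-- inner loop of A: scan forward from the cell after i; equal value sets con, space continues, anything else breaks
def checkInner (v : String) : List String → Bool → Bool
  | [], con => con
  | x :: xs, con =>
      if x == v then checkInner v xs true
      else if x == " " then checkInner v xs con
      else con

-- outer loop of A over the copied list (the copy l = lis[:] has the same elements)
def checkOuter : List String → Bool → Bool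
  | [], con => con
  | x :: xs, con =>
      if x == " " then checkOuter xs con
      else checkOuter xs (checkInner x xs con)

def check (lis : List String) : Bool := checkOuter lis false

-- ===== PORT B =====
def checkAltGo (prev : Option String) : List String → Bool
  | [] => false
  | x :: xs =>
      if x == " " then checkAltGo prev xs
      else if some x == prev then true
      else checkAltGo (some x) xs

def check_alt (lis : List String) : Bool := checkAltGo none lis

-- ===== PRECONDITION & SPEC =====
def Spec_check (lis : List String) (out : Bool) : Prop := out = check_alt lis
instance (lis : List String) (out : Bool) : Decidable (Spec_check lis out) := by unfold Spec_check; infer_instance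

-- ===== CLAIM (what is proved, stated in full; the proofs are below) =====
def Claim_equal_check : Prop := ∀ (lis : List String), Dom_check lis → Spec_check lis (check lis)

-- ===== LEMMAS AND PROOFS =====
theorem checkInner_true (l : List String) (v : String) : checkInner v l true = true := by
  induction l with
  | nil => rfl
  | cons x xs ih => simp [checkInner]; split_ifs <;> simp [ih]

theorem checkInner_or (l : List String) (v : String) (con : Bool) :
    checkInner v l con = (con || checkInner v l false) := by
  induction l generalizing con with
  | nil => cases con <;> rfl
  | cons x xs ih =>
      simp only [checkInner]
      split_ifs with h1 h2
      · simp [checkInner_true]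
      · rw [ih con]
      · cases con <;> rfl

theorem checkOuter_or (l : List String) (con : Bool) :
    checkOuter l con = (con || checkOuter l false) := by
  induction l generalizing con with
  | nil => cases con <;> rfl
  | cons x xs ih =>
      simp only [checkOuter]
      split_ifs with h1
      · rw [ih con]
      · rw [ih (checkInner x xs con), checkInner_or,
          ih (checkInner x xs false), Bool.or_assoc]

theorem claimC (l : List String) (v : String) (hvs : (v == " ") = false) :
    (checkInner v l false || checkOuter l false) = checkAltGo (some v) l := by
  induction l generalizing v with
  | nil => rfl
  | cons x xs ih =>
      simp only [checkInner, checkOuter, checkAltGo]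
      by_cases hv : x == v
      · have hx : x = v := eq_of_beq hv
        subst hx
        simp [hvs, checkInner_true]
      · have hx : (some x == some v) = false := by
          simp only [Option.some_beq_some]
          exact Bool.eq_false_iff.mpr (by simpa using hv)
        by_cases hs : x == " "
        · simp [hv, hs, ih v hvs]
        · simp [hv, hs, hx]
          rw [checkOuter_or xs (checkInner x xs false)]
          exact ih x (by simpa using hs)

theorem claimD (l : List String) : checkOuter l false = checkAltGo none l := by
  induction l with
  | nil => rfl
  | cons x xs ih =>
      simp only [checkOuter, checkAltGo]
      by_cases hs : x == " "
      · simp [hs, ih]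
      · simp [hs]
        rw [checkOuter_or xs (checkInner x xs false)]
        exact claimC xs x (by simpa using hs)

-- ===== VERDICT (by name: the statement is the Claim_ definition above) =====
theorem check_spec : Claim_equal_check := by
  intro lis _
  unfold Spec_check check check_alt
  exact claimD lis
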